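-- pv_equiv track=rewrite | github.com/sander777/struct_n_algs_lab_1 | lab1.py | A_arr1
-- ===== SOURCE A (Python) =====
-- def A_arr1(l: list):
--     array = l.copy()
--     res = list()
--     while len(array) > 0:
--         res.append(max(array))
--         array.remove(max(array))
--         res.insert(0, max(array))
--         array.remove(max(array))
--     return res
-- ===== SOURCE B (Python) =====
-- def A_arr1(l: list):
--     s = sorted(l, reverse=True)
--     front, back = [], []
--     odd = False
--     for x in s:
--         if odd:
--             front.append(x)
--         else:
--             back.append(x)
--         odd = not odd
--     front.reverse()
--     return front + back
-- ===== Notes on version B (the rewrite author's own statement) =====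
-- stated objective: faster
-- what changed: A repeatedly scans for and removes the maximum twice per loop iteration (quadratic); B sorts once in descending order, then makes one pass distributing elements alternately to a back list (even positions) and a front list (odd positions, reversed at the end).
import Mathlib
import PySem

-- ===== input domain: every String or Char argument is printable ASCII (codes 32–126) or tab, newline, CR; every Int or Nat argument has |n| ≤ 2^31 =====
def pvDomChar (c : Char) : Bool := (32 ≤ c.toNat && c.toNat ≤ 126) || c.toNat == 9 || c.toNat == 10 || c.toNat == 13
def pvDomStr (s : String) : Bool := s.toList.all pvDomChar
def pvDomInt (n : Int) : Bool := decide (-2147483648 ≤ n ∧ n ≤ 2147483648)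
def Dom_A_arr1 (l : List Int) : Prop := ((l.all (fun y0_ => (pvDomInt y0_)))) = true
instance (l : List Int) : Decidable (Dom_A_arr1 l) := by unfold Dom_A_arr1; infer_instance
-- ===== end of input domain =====

-- B sorts once (descending) and distributes elements alternately front/back in one pass,
-- replacing A's repeated max-scan-and-remove loop; measured objective: faster (asymptotic).


-- ===== PORT A =====
-- while len(array) > 0: res.append(max(array)); array.remove(max(array));
--                       res.insert(0, max(array)); array.remove(max(array))
-- fuel = initial length, strictly more than the number of iterations.
-- The 'none' branch of the second max is where Python raises ValueError (odd length; outside Pre_).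
def A_arr1Loop : Nat → List Int → List Int → List Int
  | 0, _, res => res
  | fuel+1, array, res =>
    if array.length > 0 then
      match PySem.List.max? array (fun y => y) with
      | none => res
      | some m1 =>
        let array1 := (PySem.List.remove? array m1).getD array
        match PySem.List.max? array1 (fun y => y) with
        | none => res ++ [m1]
        | some m2 =>
          let array2 := (PySem.List.remove? array1 m2).getD array1
          A_arr1Loop fuel array2 (m2 :: (res ++ [m1]))
    else res

def A_arr1 (l : List Int) : List Int := A_arr1Loop l.length l []

-- ===== PORT B =====
def A_arr1_alt (l : List Int) : List Int :=
  let s := PySem.List.sorted l (fun y => y) true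
  let st := s.foldl (fun (st : List Int × List Int × Bool) x =>
      if st.2.2 then (st.1 ++ [x], st.2.1, !st.2.2) else (st.1, st.2.1 ++ [x], !st.2.2))
      ([], [], false)
  st.1.reverse ++ st.2.1

-- ===== PRECONDITION & SPEC =====
-- Pre_: even-length lists only — on odd-length lists A raises ValueError (max() of the emptied array mid-iteration), while B returns a value.
def Pre_A_arr1 (l : List Int) : Prop := l.length % 2 = 0
instance (l : List Int) : Decidable (Pre_A_arr1 l) := by unfold Pre_A_arr1; infer_instance
def pvWitness_A_arr1 : List Int := [3, 1, 2, 4]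

def Spec_A_arr1 (l : List Int) (out : List Int) : Prop := out = A_arr1_alt l
instance (l : List Int) (out : List Int) : Decidable (Spec_A_arr1 l out) := by unfold Spec_A_arr1; infer_instance

-- ===== CLAIM (what is proved, stated in full; the proofs are below) =====
def Claim_equal_A_arr1 : Prop := ∀ (l : List Int), Dom_A_arr1 l → Pre_A_arr1 l → Spec_A_arr1 l (A_arr1 l)

-- ===== LEMMAS AND PROOFS =====

-- elements at even / odd positions
mutual
  def pvEvens : List Int → List Int
    | [] => []
    | x :: t => x :: pvOdds t
  def pvOdds : List Int → List Int
    | [] => []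
    | _ :: t => pvEvens t
end

-- shorthand for sorted-descending
def pvSd (xs : List Int) : List Int := PySem.List.sorted xs (fun y => y) true

theorem pvSd_unique (xs ys : List Int) (hp : ys.Perm xs)
    (hs : ys.Pairwise (fun a b : Int => b ≤ a)) : pvSd xs = ys := by
  have h1 : (pvSd xs).Perm ys := (PySem.List.sorted_perm ..).trans hp.symm
  have h2 : (pvSd xs).Pairwise (fun a b : Int => b ≤ a) :=
    PySem.List.sorted_pairwise_rev ..
  exact h1.eq_of_pairwise (fun a b _ _ hab hba => le_antisymm hba hab) h2 hs

theorem pvSd_max (array : List Int) (m : Int) (t : List Int)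
    (h : pvSd array = m :: t) : PySem.List.max? array (fun y => y) = some m := by
  have h' : PySem.List.sorted array (fun y => y) true = m :: t := h
  have hmem : m ∈ array := by
    have : m ∈ pvSd array := by rw [h]; exact List.mem_cons_self ..
    exact (PySem.List.mem_sorted ..).mp this
  have hne : array ≠ [] := fun h0 => by simp [h0] at hmem
  obtain ⟨m', hm'⟩ : ∃ m', PySem.List.max? array (fun y => y) = some m' := by
    cases hmx : PySem.List.max? array (fun y => y) with
    | none => exact absurd ((PySem.List.max?_eq_none_iff ..).mp hmx) hne
    | some v => exact ⟨v, rfl⟩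
  have h1 : m' ≤ m :=
    PySem.List.key_head_sorted_rev_ge array (fun y => y) h' m' (PySem.List.max?_mem hm')
  have h2 : m ≤ m' := PySem.List.max?_isMax hm' m hmem
  rw [hm', le_antisymm h1 h2]

theorem pvSd_erase (array : List Int) (m : Int) (t : List Int)
    (h : pvSd array = m :: t) : pvSd (array.erase m) = t := by
  have hperm : (m :: t).Perm array := h ▸ PySem.List.sorted_perm ..
  have hp : t.Perm (array.erase m) := by
    have := hperm.erase m
    simpa using this
  have hpw : (m :: t).Pairwise (fun a b : Int => b ≤ a) :=
    h ▸ PySem.List.sorted_pairwise_rev ..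
  exact pvSd_unique _ _ hp (List.Pairwise.of_cons hpw)

theorem pvRemove_erase (array : List Int) (m : Int) (hm : m ∈ array) :
    (PySem.List.remove? array m).getD array = array.erase m := by
  rw [PySem.List.remove?_eq_some_erase array m hm]
  rfl

theorem pvLoop_char : ∀ (fuel : Nat) (array res : List Int),
    array.length ≤ fuel → array.length % 2 = 0 →
    A_arr1Loop fuel array res = (pvOdds (pvSd array)).reverse ++ res ++ pvEvens (pvSd array) := by
  intro fuel
  induction fuel with
  | zero =>
    intro array res hle _
    have : array = [] := List.length_eq_zero_iff.mp (Nat.le_zero.mp hle)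
    subst this
    simp [A_arr1Loop, pvSd, PySem.List.sorted, pvOdds, pvEvens]
  | succ n ih =>
    intro array res hle hev
    by_cases hnil : array = []
    · subst hnil
      simp [A_arr1Loop, pvSd, PySem.List.sorted, pvOdds, pvEvens]
    · have hlen : 0 < array.length := List.length_pos_iff.mpr hnil
      obtain ⟨m, t, hs⟩ : ∃ m t, pvSd array = m :: t := by
        cases hsd : pvSd array with
        | nil => exact absurd ((PySem.List.sorted_eq_nil_iff ..).mp hsd) hnil
        | cons a b => exact ⟨a, b, rfl⟩
      have hlens : (pvSd array).length = array.length := PySem.List.length_sorted ..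
      have hm_mem : m ∈ array := (PySem.List.mem_sorted ..).mp (hs ▸ List.mem_cons_self ..)
      have hrm1 := pvRemove_erase array m hm_mem
      have hsd1 : pvSd (array.erase m) = t := pvSd_erase array m t hs
      have hlen1 : (array.erase m).length = array.length - 1 := List.length_erase_of_mem hm_mem
      obtain ⟨m2, t2, hs2⟩ : ∃ m2 t2, t = m2 :: t2 := by
        cases ht : t with
        | nil =>
          exfalso
          have : array.length = 1 := by rw [← hlens, hs, ht]; rfl
          omega
        | cons a b => exact ⟨a, b, rfl⟩
      have hm2_mem : m2 ∈ array.erase m := by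
        have : m2 ∈ pvSd (array.erase m) := by rw [hsd1, hs2]; exact List.mem_cons_self ..
        exact (PySem.List.mem_sorted ..).mp this
      have hrm2 := pvRemove_erase (array.erase m) m2 hm2_mem
      have hsd2 : pvSd ((array.erase m).erase m2) = t2 :=
        pvSd_erase (array.erase m) m2 t2 (by rw [hsd1, hs2])
      have hlen2 : ((array.erase m).erase m2).length = array.length - 2 := by
        rw [List.length_erase_of_mem hm2_mem, hlen1]
        omega
      have hih := ih ((array.erase m).erase m2) (m2 :: (res ++ [m]))
        (by omega) (by omega)
      show A_arr1Loop (n+1) array res = _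
      rw [A_arr1Loop]
      rw [if_pos hlen, pvSd_max array m t hs]
      simp only [hrm1]
      rw [pvSd_max (array.erase m) m2 t2 (by rw [hsd1, hs2])]
      simp only [hrm2]
      rw [hih, hsd2, hs, hs2]
      simp [pvOdds, pvEvens]

-- the loop body of B's fold, named for the proofs (definitionally the lambda in A_arr1_alt)
def pvStep (st : List Int × List Int × Bool) (x : Int) : List Int × List Int × Bool :=
  if st.2.2 then (st.1 ++ [x], st.2.1, !st.2.2) else (st.1, st.2.1 ++ [x], !st.2.2)

theorem pvAlt_eq (l : List Int) :
    A_arr1_alt l = ((pvSd l).foldl pvStep ([], [], false)).1.reverse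
      ++ ((pvSd l).foldl pvStep ([], [], false)).2.1 := rfl

theorem pvFold_char : ∀ (s fr bk : List Int) (o : Bool),
    ((s.foldl pvStep (fr, bk, o)).1, (s.foldl pvStep (fr, bk, o)).2.1)
    = (fr ++ (if o then pvEvens s else pvOdds s), bk ++ (if o then pvOdds s else pvEvens s)) := by
  intro s
  induction s with
  | nil => intro fr bk o; cases o <;> simp [pvEvens, pvOdds]
  | cons x t ih =>
    intro fr bk o
    cases o with
    | false =>
      rw [List.foldl_cons, show pvStep (fr, bk, false) x = (fr, bk ++ [x], true) from rfl, ih]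
      simp [pvEvens, pvOdds]
    | true =>
      rw [List.foldl_cons, show pvStep (fr, bk, true) x = (fr ++ [x], bk, false) from rfl, ih]
      simp [pvEvens, pvOdds]

theorem pvAlt_char (l : List Int) :
    A_arr1_alt l = (pvOdds (pvSd l)).reverse ++ pvEvens (pvSd l) := by
  have h := pvFold_char (pvSd l) [] [] false
  have h1 : ((pvSd l).foldl pvStep ([], [], false)).1 = pvOdds (pvSd l) := by
    have := congrArg Prod.fst h; simpa using this
  have h2 : ((pvSd l).foldl pvStep ([], [], false)).2.1 = pvEvens (pvSd l) := by
    have := congrArg Prod.snd h; simpa using this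
  rw [pvAlt_eq, h1, h2]

-- ===== VERDICT (by name: the statement is the Claim_ definition above) =====
theorem A_arr1_spec : Claim_equal_A_arr1 := by
  intro l _ hpre
  unfold Spec_A_arr1
  unfold A_arr1
  rw [pvLoop_char l.length l [] (le_refl _) hpre, pvAlt_char]
  simp
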